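-- pv_equiv track=rewrite | github.com/harvestwhisperer/hm64-decomp | tools/libhm64/yay0/compress_sprite.py | unique_frames
-- ===== SOURCE A (Python) =====
-- def unique_frames(sheet_index: list[int]) -> list[int]:
--     """Return the list of distinct consecutive offsets, stopping at the first regression.
--
--     Trailing zeros in SpritesheetIndex are padding to alignment.
--     The last real entry equals the uncompressed spritesheet length (sentinel).
--     """
--     out = []
--     for off in sheet_index:
--         if out and off < out[-1]:
--             break
--         if not out or off != out[-1]:
--             out.append(off)
--     return out
-- ===== SOURCE B (Python) =====
-- def unique_frames(sheet_index: list[int]) -> list[int]: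
--     """Two passes: cut at first regression, then collapse consecutive duplicates."""
--     cut = len(sheet_index)
--     for i, (prev, cur) in enumerate(zip(sheet_index, sheet_index[1:]), 1):
--         if cur < prev:
--             cut = i
--             break
--     prefix = sheet_index[:cut]
--     return [x for i, x in enumerate(prefix) if i == 0 or x != prefix[i - 1]]
-- ===== Notes on version B (the rewrite author's own statement) =====
-- stated objective: simpler
-- what changed: Replaced A's single interleaved loop (break + dedup against the accumulator's last element) by two separate passes: first find the cut index at the first adjacent regression and slice the prefix, then collapse consecutive duplicates in that prefix.
import Mathlib
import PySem

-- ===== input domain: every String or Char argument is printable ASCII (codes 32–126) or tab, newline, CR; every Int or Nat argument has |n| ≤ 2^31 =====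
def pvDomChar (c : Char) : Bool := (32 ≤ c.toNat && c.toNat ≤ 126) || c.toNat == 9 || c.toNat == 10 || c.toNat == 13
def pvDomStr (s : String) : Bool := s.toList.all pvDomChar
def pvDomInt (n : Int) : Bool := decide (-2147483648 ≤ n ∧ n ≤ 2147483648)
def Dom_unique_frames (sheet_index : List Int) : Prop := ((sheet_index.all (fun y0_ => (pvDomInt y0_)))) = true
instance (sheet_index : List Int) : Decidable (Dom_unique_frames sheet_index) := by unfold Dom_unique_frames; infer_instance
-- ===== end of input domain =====

-- B is a simpler two-pass decomposition (cut at first regression, then collapse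
-- consecutive duplicates) of A's single interleaved loop; same asymptotic cost.

-- ===== PORT A =====
-- A's for-loop with break and an accumulator `out`, appending when the new
-- element differs from out[-1] and stopping at the first off < out[-1].
def ufLoopA : List Int → List Int → List Int
  | [], out => out
  | off :: rest, out =>
    match out.getLast? with
    | none => ufLoopA rest (out ++ [off])
    | some last =>
      if off < last then out
      else if off ≠ last then ufLoopA rest (out ++ [off])
      else ufLoopA rest out

def unique_frames (sheet_index : List Int) : List Int :=
  ufLoopA sheet_index []

-- ===== PORT B =====
-- pass 1 of Source B: the loop over zip(xs, xs[1:]) finding the first index i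
-- (1-based) with xs[i] < xs[i-1]; default len(xs).
def ufCutIdx : List Int → Nat
  | [] => 0
  | [_] => 1
  | a :: b :: rest => if b < a then 1 else 1 + ufCutIdx (b :: rest)

-- pass 2 of Source B: [x for i,x in enumerate(prefix) if i == 0 or x != prefix[i-1]]
def ufDedupFrom : Int → List Int → List Int
  | _, [] => []
  | prev, b :: rest => if b ≠ prev then b :: ufDedupFrom b rest else ufDedupFrom prev rest

def ufDedup : List Int → List Int
  | [] => []
  | a :: rest => a :: ufDedupFrom a rest

def unique_frames_alt (sheet_index : List Int) : List Int :=
  ufDedup (sheet_index.take (ufCutIdx sheet_index))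

-- ===== PRECONDITION & SPEC =====
def Spec_unique_frames (sheet_index : List Int) (out : List Int) : Prop := out = unique_frames_alt sheet_index
instance (sheet_index : List Int) (out : List Int) : Decidable (Spec_unique_frames sheet_index out) := by unfold Spec_unique_frames; infer_instance

-- ===== CLAIM (what is proved, stated in full; the proofs are below) =====
def Claim_equal_unique_frames : Prop := ∀ (sheet_index : List Int), Dom_unique_frames sheet_index → Spec_unique_frames sheet_index (unique_frames sheet_index)

-- ===== LEMMAS AND PROOFS =====

-- number of elements of the tail kept before the first regression, relative to prev
def ufCutTail : Int → List Int → Nat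
  | _, [] => 0
  | prev, b :: rest => if b < prev then 0 else 1 + ufCutTail b rest

theorem ufCutIdx_cons (a : Int) (rest : List Int) :
    ufCutIdx (a :: rest) = 1 + ufCutTail a rest := by
  induction rest generalizing a with
  | nil => simp [ufCutIdx, ufCutTail]
  | cons b rest ih =>
    simp only [ufCutIdx, ufCutTail]
    split_ifs with h
    · rfl
    · rw [ih]

-- key invariant: A's loop from accumulator acc ++ [prev] appends exactly
-- B's dedup of the kept tail
theorem ufLoopA_inv (xs : List Int) (prev : Int) (acc : List Int) :
    ufLoopA xs (acc ++ [prev]) =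
      (acc ++ [prev]) ++ ufDedupFrom prev (xs.take (ufCutTail prev xs)) := by
  induction xs generalizing prev acc with
  | nil => simp [ufLoopA, ufCutTail, ufDedupFrom]
  | cons b rest ih =>
    simp only [ufLoopA, List.getLast?_concat, ufCutTail]
    split_ifs with h1 h2
    · simp [ufDedupFrom]
    · rw [show (1 + ufCutTail b rest : Nat) = ufCutTail b rest + 1 by omega]
      simp only [List.take_succ_cons, ufDedupFrom]
      rw [show acc ++ [prev] ++ [b] = (acc ++ [prev]) ++ [b] from rfl] at *
      rw [ih b (acc ++ [prev])]
      simp [h2, List.append_assoc]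
    · -- b = prev
      have hb : b = prev := by
        by_contra hc; exact h2 hc
      rw [show (1 + ufCutTail b rest : Nat) = ufCutTail b rest + 1 by omega]
      simp only [List.take_succ_cons, ufDedupFrom]
      rw [ih prev acc]
      simp [hb]

-- ===== VERDICT (by name: the statement is the Claim_ definition above) =====
theorem unique_frames_spec : Claim_equal_unique_frames := by
  intro xs _
  unfold Spec_unique_frames unique_frames unique_frames_alt
  cases xs with
  | nil => rfl
  | cons a rest =>
    rw [ufCutIdx_cons]
    rw [show (1 + ufCutTail a rest : Nat) = ufCutTail a rest + 1 by omega]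
    simp only [List.take_succ_cons, ufDedup]
    have := ufLoopA_inv rest a []
    simpa [ufLoopA] using this
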